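-- pv_equiv track=rewrite | github.com/joseigor/consorcio | analyze_optimal_cotas.py | find_selected_cota
-- ===== SOURCE A (Python) =====
-- from typing import List, Tuple, Set, Dict
--
-- def find_selected_cota(initial_draw: int, active_cotas: Set[int],
--                        max_cota: int) -> int:
--     """
--     Simulate selection algorithm: -1, +1, -2, +2, -3, +3...
--     (searches BELOW first, then ABOVE)
--     """
--     if initial_draw in active_cotas:
--         return initial_draw
--
--     for offset in range(1, max_cota):
--         # Try below FIRST (-)
--         below = initial_draw - offset
--         if below >= 1 and below in active_cotas:
--             return below
--
--         # Then try above (+)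
--         above = initial_draw + offset
--         if above <= max_cota and above in active_cotas:
--             return above
--
--     return None
-- ===== SOURCE B (Python) =====
-- def find_selected_cota(initial_draw, active_cotas, max_cota):
--     """One pass over the cotas themselves instead of scanning every offset:
--     keep the closest eligible cota below and above the draw, then pick the
--     nearer (below wins ties)."""
--     if initial_draw in active_cotas:
--         return initial_draw
--     best_below = None
--     best_above = None
--     for c in active_cotas:
--         if 1 <= c < initial_draw and initial_draw - c < max_cota:
--             if best_below is None or c > best_below:
--                 best_below = c
--         elif initial_draw < c <= max_cota and c - initial_draw < max_cota:
--             if best_above is None or c < best_above: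
--                 best_above = c
--     if best_below is None:
--         return best_above
--     if best_above is None:
--         return best_below
--     return best_below if initial_draw - best_below <= best_above - initial_draw else best_above
-- ===== Notes on version B (the rewrite author's own statement) =====
-- stated objective: alternative
-- what changed: Instead of scanning offsets 1..max_cota-1 and testing membership at each step, B makes one pass over the cotas collection keeping the closest eligible cota below and above the draw, then picks the nearer with below winning ties; cost O(n) over the cotas instead of O(max_cota) over offsets.
import Mathlib
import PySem

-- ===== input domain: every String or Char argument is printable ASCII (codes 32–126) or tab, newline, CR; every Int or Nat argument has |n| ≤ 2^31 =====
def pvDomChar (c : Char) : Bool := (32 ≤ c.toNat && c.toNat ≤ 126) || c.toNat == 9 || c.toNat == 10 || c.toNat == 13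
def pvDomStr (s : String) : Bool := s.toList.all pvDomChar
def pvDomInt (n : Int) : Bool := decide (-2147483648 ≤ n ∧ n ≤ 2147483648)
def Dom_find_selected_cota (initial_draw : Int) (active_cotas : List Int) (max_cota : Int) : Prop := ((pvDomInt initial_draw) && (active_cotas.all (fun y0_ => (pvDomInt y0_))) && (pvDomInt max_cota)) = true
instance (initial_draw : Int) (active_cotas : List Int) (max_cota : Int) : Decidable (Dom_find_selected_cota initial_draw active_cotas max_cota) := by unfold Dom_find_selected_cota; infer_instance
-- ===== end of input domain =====

-- B replaces A's scan over offsets 1..max_cota-1 by one pass over the cotas themselves,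
-- keeping the closest eligible cota below/above the draw; objective: alternative algorithm.

-- ===== PORT A =====
-- the `for offset in range(1, max_cota)` loop with its early returns
def pvLoopA (initial_draw : Int) (active_cotas : List Int) (max_cota : Int) : List Int → Option Int
  | [] => none
  | offset :: rest =>
    let below := initial_draw - offset
    if below ≥ 1 ∧ below ∈ active_cotas then some below
    else
      let above := initial_draw + offset
      if above ≤ max_cota ∧ above ∈ active_cotas then some above
      else pvLoopA initial_draw active_cotas max_cota rest

def find_selected_cota (initial_draw : Int) (active_cotas : List Int) (max_cota : Int) : Option Int :=
  if initial_draw ∈ active_cotas then some initial_draw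
  else pvLoopA initial_draw active_cotas max_cota (PySem.List.pyRange 1 max_cota 1)

-- ===== PORT B =====
-- one step of B's single pass: update (best_below, best_above) with cota c
def pvStepB (initial_draw max_cota : Int) (acc : Option Int × Option Int) (c : Int) : Option Int × Option Int :=
  if 1 ≤ c ∧ c < initial_draw ∧ initial_draw - c < max_cota then
    (match acc.1 with
     | none => some c
     | some b => if c > b then some c else some b, acc.2)
  else if initial_draw < c ∧ c ≤ max_cota ∧ c - initial_draw < max_cota then
    (acc.1,
     match acc.2 with
     | none => some c
     | some b => if c < b then some c else some b)
  else acc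

-- B's final choice: nearer of the two candidates, below winning ties
def pvChoose (initial_draw : Int) : Option Int → Option Int → Option Int
  | none, ba => ba
  | some bb, none => some bb
  | some bb, some ba =>
    if initial_draw - bb ≤ ba - initial_draw then some bb else some ba

def find_selected_cota_alt (initial_draw : Int) (active_cotas : List Int) (max_cota : Int) : Option Int :=
  if initial_draw ∈ active_cotas then some initial_draw
  else
    let acc := active_cotas.foldl (pvStepB initial_draw max_cota) (none, none)
    pvChoose initial_draw acc.1 acc.2

-- ===== PRECONDITION & SPEC =====
def Spec_find_selected_cota (initial_draw : Int) (active_cotas : List Int) (max_cota : Int) (out : Option Int) : Prop := out = find_selected_cota_alt initial_draw active_cotas max_cota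
instance (initial_draw : Int) (active_cotas : List Int) (max_cota : Int) (out : Option Int) : Decidable (Spec_find_selected_cota initial_draw active_cotas max_cota out) := by unfold Spec_find_selected_cota; infer_instance

-- ===== CLAIM (what is proved, stated in full; the proofs are below) =====
def Claim_equal_find_selected_cota : Prop := ∀ (initial_draw : Int) (active_cotas : List Int) (max_cota : Int), Dom_find_selected_cota initial_draw active_cotas max_cota → Spec_find_selected_cota initial_draw active_cotas max_cota (find_selected_cota initial_draw active_cotas max_cota)

-- ===== LEMMAS AND PROOFS =====

-- proof-side characterisations of the two running bests
def pvMaxF : List Int → Option Int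
  | [] => none
  | c :: r => match pvMaxF r with
    | none => some c
    | some b => some (max c b)

def pvMinF : List Int → Option Int
  | [] => none
  | c :: r => match pvMinF r with
    | none => some c
    | some b => some (min c b)

def pvOMax : Option Int → Option Int → Option Int
  | none, y => y
  | some b, none => some b
  | some b, some c => some (max b c)

def pvOMin : Option Int → Option Int → Option Int
  | none, y => y
  | some b, none => some b
  | some b, some c => some (min b c)

def pvPb (i m c : Int) : Bool := decide (1 ≤ c ∧ c < i ∧ i - c < m)
def pvPa (i m c : Int) : Bool := decide (i < c ∧ c ≤ m ∧ c - i < m)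

lemma pvFoldB_eq (i m : Int) : ∀ (cs : List Int) (b0 a0 : Option Int),
    cs.foldl (pvStepB i m) (b0, a0) =
      (pvOMax b0 (pvMaxF (cs.filter (pvPb i m))), pvOMin a0 (pvMinF (cs.filter (pvPa i m)))) := by
  intro cs
  induction cs with
  | nil => intro b0 a0; cases b0 <;> cases a0 <;> simp [pvOMax, pvOMin, pvMaxF, pvMinF]
  | cons c rest ih =>
    intro b0 a0
    by_cases hb : 1 ≤ c ∧ c < i ∧ i - c < m
    · have hpb : pvPb i m c = true := by simp [pvPb, hb]
      have hpa : pvPa i m c = false := by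
        simp only [pvPa, decide_eq_false_iff_not]; omega
      simp only [List.foldl_cons, pvStepB, if_pos hb, List.filter_cons, hpb, hpa,
        if_true, Bool.false_eq_true, if_false, ih]
      congr 1
      cases b0 with
      | none =>
        cases hM : pvMaxF (rest.filter (pvPb i m)) <;>
          simp [pvMaxF, pvOMax, hM]
      | some b =>
        cases hM : pvMaxF (rest.filter (pvPb i m)) <;>
          simp only [pvMaxF, hM] <;> split <;> simp only [pvOMax] <;> congr 1 <;> omega
    · by_cases ha : i < c ∧ c ≤ m ∧ c - i < m
      · have hpb : pvPb i m c = false := by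
          simp only [pvPb, decide_eq_false_iff_not]; omega
        have hpa : pvPa i m c = true := by simp [pvPa, ha]
        simp only [List.foldl_cons, pvStepB, if_neg hb, if_pos ha, List.filter_cons, hpb, hpa,
          if_true, Bool.false_eq_true, if_false, ih]
        congr 1
        cases a0 with
        | none =>
          cases hM : pvMinF (rest.filter (pvPa i m)) <;>
            simp [pvMinF, pvOMin, hM]
        | some b =>
          cases hM : pvMinF (rest.filter (pvPa i m)) <;>
            simp only [pvMinF, hM] <;> split <;> simp only [pvOMin] <;> congr 1 <;> omega
      · have hpb : pvPb i m c = false := by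
          simp only [pvPb, decide_eq_false_iff_not]; omega
        have hpa : pvPa i m c = false := by
          simp only [pvPa, decide_eq_false_iff_not]; omega
        simp only [List.foldl_cons, pvStepB, if_neg hb, if_neg ha, List.filter_cons, hpb, hpa,
          Bool.false_eq_true, if_false, ih]

lemma pvMaxF_eq_none : ∀ (l : List Int), pvMaxF l = none → l = [] := by
  intro l h
  cases l with
  | nil => rfl
  | cons c r => cases hr : pvMaxF r <;> simp [pvMaxF, hr] at h

lemma pvMinF_eq_none : ∀ (l : List Int), pvMinF l = none → l = [] := by
  intro l h
  cases l with
  | nil => rfl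
  | cons c r => cases hr : pvMinF r <;> simp [pvMinF, hr] at h

lemma pvMaxF_bound : ∀ (l : List Int) (b : Int), pvMaxF l = some b → b ∈ l ∧ ∀ c ∈ l, c ≤ b := by
  intro l
  induction l with
  | nil => intro b h; simp [pvMaxF] at h
  | cons c r ih =>
    intro b h
    cases hr : pvMaxF r with
    | none =>
      have hre : r = [] := pvMaxF_eq_none r hr
      subst hre
      simp only [pvMaxF] at h
      have hb : b = c := by simpa using h.symm
      subst hb; simp
    | some b' =>
      simp only [pvMaxF, hr] at h
      obtain ⟨hmem, hub⟩ := ih b' hr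
      have hb : b = max c b' := by simpa using h.symm
      constructor
      · rcases le_total c b' with hcb | hcb
        · have : b = b' := by omega
          rw [this]; exact List.mem_cons_of_mem _ hmem
        · have : b = c := by omega
          rw [this]; exact List.mem_cons_self
      · intro x hx
        rcases List.mem_cons.mp hx with hx | hx
        · omega
        · have := hub x hx; omega

lemma pvMinF_bound : ∀ (l : List Int) (b : Int), pvMinF l = some b → b ∈ l ∧ ∀ c ∈ l, b ≤ c := by
  intro l
  induction l with
  | nil => intro b h; simp [pvMinF] at h
  | cons c r ih =>
    intro b h
    cases hr : pvMinF r with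
    | none =>
      have hre : r = [] := pvMinF_eq_none r hr
      subst hre
      simp only [pvMinF] at h
      have hb : b = c := by simpa using h.symm
      subst hb; simp
    | some b' =>
      simp only [pvMinF, hr] at h
      obtain ⟨hmem, hlb⟩ := ih b' hr
      have hb : b = min c b' := by simpa using h.symm
      constructor
      · rcases le_total c b' with hcb | hcb
        · have : b = c := by omega
          rw [this]; exact List.mem_cons_self
        · have : b = b' := by omega
          rw [this]; exact List.mem_cons_of_mem _ hmem
      · intro x hx
        rcases List.mem_cons.mp hx with hx | hx
        · omega
        · have := hlb x hx; omega

lemma pvMaxF_ne_none : ∀ (l : List Int), l ≠ [] → ∃ b, pvMaxF l = some b := by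
  intro l h
  cases l with
  | nil => exact absurd rfl h
  | cons c r => cases hr : pvMaxF r <;> simp [pvMaxF, hr]

lemma pvMinF_ne_none : ∀ (l : List Int), l ≠ [] → ∃ b, pvMinF l = some b := by
  intro l h
  cases l with
  | nil => exact absurd rfl h
  | cons c r => cases hr : pvMinF r <;> simp [pvMinF, hr]

-- exact max over a filter, given a member that dominates
lemma pvMaxF_eq_of_top (l : List Int) (p : Int → Bool) (t : Int)
    (ht : t ∈ l) (hp : p t = true) (hub : ∀ c ∈ l, p c = true → c ≤ t) :
    pvMaxF (l.filter p) = some t := by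
  have hmem : t ∈ l.filter p := List.mem_filter.mpr ⟨ht, hp⟩
  have hne : l.filter p ≠ [] := by intro h; rw [h] at hmem; simp at hmem
  obtain ⟨b, hb⟩ := pvMaxF_ne_none _ hne
  obtain ⟨hbmem, hbub⟩ := pvMaxF_bound _ _ hb
  have h1 : b ≤ t := by
    obtain ⟨hbl, hbp⟩ := List.mem_filter.mp hbmem
    exact hub b hbl hbp
  have h2 : t ≤ b := hbub t hmem
  rw [hb]; congr 1; omega

lemma pvMinF_eq_of_bot (l : List Int) (p : Int → Bool) (t : Int)
    (ht : t ∈ l) (hp : p t = true) (hlb : ∀ c ∈ l, p c = true → t ≤ c) :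
    pvMinF (l.filter p) = some t := by
  have hmem : t ∈ l.filter p := List.mem_filter.mpr ⟨ht, hp⟩
  have hne : l.filter p ≠ [] := by intro h; rw [h] at hmem; simp at hmem
  obtain ⟨b, hb⟩ := pvMinF_ne_none _ hne
  obtain ⟨hbmem, hblb⟩ := pvMinF_bound _ _ hb
  have h1 : t ≤ b := by
    obtain ⟨hbl, hbp⟩ := List.mem_filter.mp hbmem
    exact hlb b hbl hbp
  have h2 : b ≤ t := hblb t hmem
  rw [hb]; congr 1; omega

-- A's loop over offsets a..max_cota-1 equals B's choose over the remaining candidates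
def pvPbOff (i m a c : Int) : Bool := pvPb i m c && decide (a ≤ i - c)
def pvPaOff (i m a c : Int) : Bool := pvPa i m c && decide (a ≤ c - i)

lemma pvLoopA_eq (i m : Int) (cs : List Int) :
    ∀ (n : Nat) (a : Int), 1 ≤ a → (m - a).toNat = n →
      pvLoopA i cs m (PySem.List.pyRange a m 1) =
        pvChoose i (pvMaxF (cs.filter (pvPbOff i m a))) (pvMinF (cs.filter (pvPaOff i m a))) := by
  intro n
  induction n with
  | zero =>
    intro a ha hn
    have hma : m ≤ a := by omega
    rw [PySem.List.pyRange_one_eq_nil hma]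
    have hfb : cs.filter (pvPbOff i m a) = [] := by
      apply List.filter_eq_nil_iff.mpr
      intro c _; simp only [pvPbOff, pvPb, Bool.and_eq_true, decide_eq_true_eq, not_and]
      intro h1; omega
    have hfa : cs.filter (pvPaOff i m a) = [] := by
      apply List.filter_eq_nil_iff.mpr
      intro c _; simp only [pvPaOff, pvPa, Bool.and_eq_true, decide_eq_true_eq, not_and]
      intro h1; omega
    simp [hfb, hfa, pvLoopA, pvMaxF, pvMinF, pvChoose]
  | succ n ih =>
    intro a ha hn
    have ham : a < m := by omega
    rw [PySem.List.pyRange_one_cons ham]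
    simp only [pvLoopA]
    by_cases hb : i - a ≥ 1 ∧ (i - a) ∈ cs
    · rw [if_pos hb]
      -- below hit: i - a is the maximum of the below-filter and beats every above candidate
      have hmax : pvMaxF (cs.filter (pvPbOff i m a)) = some (i - a) := by
        apply pvMaxF_eq_of_top _ _ _ hb.2
        · simp only [pvPbOff, pvPb, Bool.and_eq_true, decide_eq_true_eq]; omega
        · intro c _ hc
          simp only [pvPbOff, pvPb, Bool.and_eq_true, decide_eq_true_eq] at hc; omega
      rw [hmax]
      cases hmin : pvMinF (cs.filter (pvPaOff i m a)) with
      | none => simp [pvChoose]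
      | some v =>
        obtain ⟨hvmem, _⟩ := pvMinF_bound _ _ hmin
        obtain ⟨_, hvp⟩ := List.mem_filter.mp hvmem
        simp only [pvPaOff, pvPa, Bool.and_eq_true, decide_eq_true_eq] at hvp
        simp only [pvChoose]
        rw [if_pos (by omega)]
    · rw [if_neg hb]
      have hbn : ¬ (i - a ≥ 1) ∨ (i - a) ∉ cs := by tauto
      have hfbshift : cs.filter (pvPbOff i m a) = cs.filter (pvPbOff i m (a + 1)) := by
        apply List.filter_congr
        intro c hc
        rw [Bool.eq_iff_iff]
        simp only [pvPbOff, pvPb, Bool.and_eq_true, decide_eq_true_eq]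
        by_cases hca : c = i - a
        · subst hca
          have h1 : ¬ (i - a ≥ 1) := by
            rcases hbn with h | h
            · exact h
            · exact absurd hc h
          constructor <;> intro h <;> exfalso <;> omega
        · constructor <;> intro h <;> exact ⟨h.1, by omega⟩
      by_cases hab : i + a ≤ m ∧ (i + a) ∈ cs
      · rw [if_pos hab]
        have hmin : pvMinF (cs.filter (pvPaOff i m a)) = some (i + a) := by
          apply pvMinF_eq_of_bot _ _ _ hab.2
          · simp only [pvPaOff, pvPa, Bool.and_eq_true, decide_eq_true_eq]; omega
          · intro c _ hc
            simp only [pvPaOff, pvPa, Bool.and_eq_true, decide_eq_true_eq] at hc; omega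
        rw [hmin]
        cases hmax : pvMaxF (cs.filter (pvPbOff i m a)) with
        | none => simp [pvChoose]
        | some v =>
          obtain ⟨hvmem, _⟩ := pvMaxF_bound _ _ hmax
          have hvmem' : v ∈ cs.filter (pvPbOff i m (a + 1)) := hfbshift ▸ hvmem
          obtain ⟨_, hvp'⟩ := List.mem_filter.mp hvmem'
          simp only [pvPbOff, pvPb, Bool.and_eq_true, decide_eq_true_eq] at hvp'
          simp only [pvChoose]
          rw [if_neg (by omega)]
      · rw [if_neg hab]
        have han : ¬ (i + a ≤ m) ∨ (i + a) ∉ cs := by tauto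
        have hfashift : cs.filter (pvPaOff i m a) = cs.filter (pvPaOff i m (a + 1)) := by
          apply List.filter_congr
          intro c hc
          rw [Bool.eq_iff_iff]
          simp only [pvPaOff, pvPa, Bool.and_eq_true, decide_eq_true_eq]
          by_cases hca : c = i + a
          · subst hca
            have h1 : ¬ (i + a ≤ m) := by
              rcases han with h | h
              · exact h
              · exact absurd hc h
            constructor <;> intro h <;> exfalso <;> omega
          · constructor <;> intro h <;> exact ⟨h.1, by omega⟩
        rw [hfbshift, hfashift]
        exact ih (a + 1) (by omega) (by omega)

-- ===== VERDICT (by name: the statement is the Claim_ definition above) =====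
theorem find_selected_cota_spec : Claim_equal_find_selected_cota := by
  intro i cs m _
  unfold Spec_find_selected_cota find_selected_cota find_selected_cota_alt
  by_cases hmem : i ∈ cs
  · rw [if_pos hmem, if_pos hmem]
  · rw [if_neg hmem, if_neg hmem]
    rw [pvLoopA_eq i m cs (m - 1).toNat 1 le_rfl rfl]
    rw [pvFoldB_eq i m cs none none]
    simp only [pvOMax, pvOMin]
    have h1 : cs.filter (pvPbOff i m 1) = cs.filter (pvPb i m) := by
      apply List.filter_congr
      intro c hc
      rw [Bool.eq_iff_iff]
      simp only [pvPbOff, pvPb, Bool.and_eq_true, decide_eq_true_eq]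
      constructor
      · intro h; exact h.1
      · intro h; exact ⟨h, by omega⟩
    have h2 : cs.filter (pvPaOff i m 1) = cs.filter (pvPa i m) := by
      apply List.filter_congr
      intro c hc
      rw [Bool.eq_iff_iff]
      simp only [pvPaOff, pvPa, Bool.and_eq_true, decide_eq_true_eq]
      constructor
      · intro h; exact h.1
      · intro h; exact ⟨h, by omega⟩
    rw [h1, h2]
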